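-- pv_equiv track=rewrite | github.com/PARCISZEWSKI/CT_G42_unibot | main.py | topic_detector
-- ===== SOURCE A (Python) =====
-- import string
-- from collections.abc import Iterable
--
-- def remove_punctuation(text: str) -> str:
--         """
--         Replace the punctuation characters with ''
--         """
--         return "".join(" " if c in string.punctuation else c for c in text)
--
-- def topic_detector(user_input: str, wordbag: dict[str, Iterable]) -> str:
--         """
--         Select the topic that the largest quantity of words match to, returns it
--         """
--
--         topic_counter: dict[str, int] = {topic: 0 for topic in wordbag}
--
--         # Refine the user's input in order to compare with the topic words.
--         user_input = user_input.lower()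
--         user_input = remove_punctuation(user_input)
--         input_refined: list[str] = user_input.split()
--
--         # Count the matched words per topics.
--         for word in input_refined:
--                 for topic in wordbag:
--                         if word in wordbag[topic]:
--                                 topic_counter[topic] += 1
--
--         #Sorts the dictionary keys as tuples by their values
--         rank : [list[tuple[str, int]]] = sorted(topic_counter.items(), key=lambda counter: counter[1], reverse=True)
--         if rank[0][1] != rank[1][1]:
--                 return rank[0][0]
--         return ""
-- ===== SOURCE B (Python) =====
-- import string
--
-- _PUNCT_TO_SPACE = str.maketrans(string.punctuation, " " * len(string.punctuation))
--
--
-- def topic_detector(user_input: str, wordbag) -> str: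
--     """One pass per topic with set membership, then a single unique-max scan
--     (no per-word topic rescans, no sort)."""
--     words = user_input.lower().translate(_PUNCT_TO_SPACE).split()
--     best_topic = ""
--     best = None
--     tie = False
--     for topic, bag in wordbag.items():
--         bagset = set(bag)
--         c = sum(1 for w in words if w in bagset)
--         if best is None or c > best:
--             best_topic, best, tie = topic, c, False
--         elif c == best:
--             tie = True
--     return "" if tie else best_topic
-- ===== Notes on version B (the rewrite author's own statement) =====
-- stated objective: alternative
-- what changed: B swaps the loop nesting (one counting pass per topic with a set for membership instead of rescanning every topic's word list for every input word) and replaces the sort-then-compare-top-two ranking by a single unique-maximum scan.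
import Mathlib
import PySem

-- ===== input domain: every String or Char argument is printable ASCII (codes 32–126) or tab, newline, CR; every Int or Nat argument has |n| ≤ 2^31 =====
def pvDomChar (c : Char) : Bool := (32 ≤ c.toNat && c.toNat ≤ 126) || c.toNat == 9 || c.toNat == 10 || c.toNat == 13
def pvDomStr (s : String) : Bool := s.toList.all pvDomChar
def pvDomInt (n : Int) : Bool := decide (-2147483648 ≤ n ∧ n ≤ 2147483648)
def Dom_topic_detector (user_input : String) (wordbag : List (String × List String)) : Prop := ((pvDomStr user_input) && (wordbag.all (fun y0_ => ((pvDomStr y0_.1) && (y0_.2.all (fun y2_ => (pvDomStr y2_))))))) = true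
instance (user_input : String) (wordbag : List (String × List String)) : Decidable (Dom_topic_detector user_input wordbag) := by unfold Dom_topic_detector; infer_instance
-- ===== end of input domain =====

-- B replaces A's per-word rescan of every topic list and the final sort by one counting
-- pass per topic (set membership) and a single unique-maximum scan; same return value,
-- different structure (no speed claim).


-- string.punctuation, as a list of chars
def pvPunct : List Char := "!\"#$%&'()*+,-./:;<=>?@[\\]^_`{|}~".toList

-- shared helper: A's remove_punctuation and B's translate table both map every
-- punctuation character to ' ' and keep every other character (exact, char by char)
def removePunctuation (text : String) : String :=
  String.ofList (text.toList.map (fun c => if pvPunct.contains c then ' ' else c))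

-- ===== PORT A =====
-- the Python dict wordbag is the association list under dict semantics: PySem.Dict.ofList
def topic_detector (user_input : String) (wordbag : List (String × List String)) : String :=
  let d := PySem.Dict.ofList wordbag
  -- topic_counter = {topic: 0 for topic in wordbag}
  let topic_counter0 : PySem.Dict String Int :=
    d.keys.foldl (fun tc t => tc.insert t 0) PySem.Dict.empty
  let input_refined := PySem.Str.split₀ (removePunctuation (PySem.Str.lower user_input))
  -- for word in input_refined: for topic in wordbag: if word in wordbag[topic]: topic_counter[topic] += 1
  let topic_counter := input_refined.foldl (fun tc word =>
      d.keys.foldl (fun tc topic =>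
        if (d.getD topic []).contains word then tc.modify topic 0 (· + 1) else tc) tc)
    topic_counter0
  let rank := PySem.List.sorted topic_counter.items (fun p => p.2) true
  -- rank[0] / rank[1]: Pre_ guarantees at least two entries (else Python raises IndexError)
  let r0 := PySem.List.pyGetD rank 0 ("", 0)
  let r1 := PySem.List.pyGetD rank 1 ("", 0)
  if r0.2 ≠ r1.2 then r0.1 else ""

-- ===== PORT B =====
-- B's loop body: update the (best_topic, best, tie) state with one topic's count c
def pvBStep (s : String × Option Int × Bool) (topic : String) (c : Int) :
    String × Option Int × Bool :=
  match s.2.1 with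
  | none => (topic, some c, false)
  | some b => if c > b then (topic, some c, false)
              else if c = b then (s.1, some b, true) else s

def topic_detector_alt (user_input : String) (wordbag : List (String × List String)) : String :=
  let d := PySem.Dict.ofList wordbag
  let words := PySem.Str.split₀ (removePunctuation (PySem.Str.lower user_input))
  -- for topic, bag in wordbag.items(): c = sum(1 for w in words if w in set(bag)); update state
  let st := d.items.foldl (fun s p =>
      pvBStep s p.1 ((words.countP (fun w => (PySem.Set.ofList p.2).contains w) : Int)))
    ("", none, false)
  if st.2.2 then "" else st.1

-- ===== PRECONDITION & SPEC =====
-- Pre_ excludes exactly the inputs with fewer than two distinct topics, on which A's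
-- 'rank[1]' raises IndexError.
def Pre_topic_detector (user_input : String) (wordbag : List (String × List String)) : Prop :=
  2 ≤ (PySem.Set.ofList (wordbag.map Prod.fst)).length
instance (user_input : String) (wordbag : List (String × List String)) : Decidable (Pre_topic_detector user_input wordbag) := by unfold Pre_topic_detector; infer_instance

def pvWitness_topic_detector : String × (List (String × List String)) :=
  ("hello there!", [("greet", ["hello", "hi"]), ("bye", ["ciao"])])

def Spec_topic_detector (user_input : String) (wordbag : List (String × List String)) (out : String) : Prop := out = topic_detector_alt user_input wordbag
instance (user_input : String) (wordbag : List (String × List String)) (out : String) : Decidable (Spec_topic_detector user_input wordbag out) := by unfold Spec_topic_detector; infer_instance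

-- ===== CLAIM (what is proved, stated in full; the proofs are below) =====
def Claim_equal_topic_detector : Prop := ∀ (user_input : String) (wordbag : List (String × List String)), Dom_topic_detector user_input wordbag → Pre_topic_detector user_input wordbag → Spec_topic_detector user_input wordbag (topic_detector user_input wordbag)

-- ===== LEMMAS AND PROOFS =====

theorem pv_keys_ofList {ν : Type} (wb : List (String × ν)) :
    (PySem.Dict.ofList wb).keys = PySem.Set.ofList (wb.map Prod.fst) := by
  unfold PySem.Dict.ofList PySem.Dict.update
  rw [PySem.Dict.keys_foldl_insert_key wb Prod.fst (fun _ p => p.2)]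
  simp [PySem.Set.update_nil_left]

-- inner topic loop: pointwise effect on the counter
theorem pv_inner_getD (topics : List String) (h : topics.Nodup)
    (tc : PySem.Dict String Int) (P : String → Bool) (x : String) :
    (topics.foldl (fun tc t => if P t then tc.modify t 0 (· + 1) else tc) tc).getD x 0
      = tc.getD x 0 + (if x ∈ topics ∧ P x then 1 else 0) := by
  induction topics generalizing tc with
  | nil => simp
  | cons t ts ih =>
    simp only [List.nodup_cons] at h
    simp only [List.foldl_cons]
    rw [ih h.2]
    by_cases hPt : P t
    · simp only [hPt, if_true]
      rw [PySem.Dict.getD_modify]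
      by_cases hx : x = t
      · subst hx
        simp [h.1, hPt]
      · simp only [hx, if_false]
        have : (x ∈ t :: ts ∧ P x = true) ↔ (x ∈ ts ∧ P x = true) := by
          simp [List.mem_cons, hx]
        rw [if_congr this rfl rfl]
    · simp only [hPt]
      congr 1
      have : (x ∈ t :: ts ∧ P x = true) ↔ (x ∈ ts ∧ P x = true) := by
        constructor
        · rintro ⟨hm, hp⟩
          rcases List.mem_cons.mp hm with rfl | hm
          · exact absurd hp (by simp [hPt])
          · exact ⟨hm, hp⟩
        · exact fun ⟨hm, hp⟩ => ⟨List.mem_cons_of_mem _ hm, hp⟩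
      rw [if_congr this rfl rfl]

-- the word loop: each topic's counter ends at its match count
theorem pv_outer_getD (words : List String) (topics : List String) (h : topics.Nodup)
    (bag : String → List String) (tc : PySem.Dict String Int) (x : String) :
    (words.foldl (fun tc word =>
        topics.foldl (fun tc topic =>
          if (bag topic).contains word then tc.modify topic 0 (· + 1) else tc) tc) tc).getD x 0
      = tc.getD x 0 + (if x ∈ topics then (words.countP (fun w => (bag x).contains w) : Int) else 0) := by
  induction words generalizing tc with
  | nil => simp
  | cons w ws ih =>
    simp only [List.foldl_cons]
    rw [ih]
    rw [pv_inner_getD topics h tc (fun t => (bag t).contains w) x]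
    rw [List.countP_cons]
    by_cases hx : x ∈ topics
    · by_cases hw : (bag x).contains w <;> simp [hx, hw] <;> ring
    · simp [hx]

-- the loops never add or reorder keys
theorem pv_inner_keys (topics : List String) (P : String → Bool)
    (tc : PySem.Dict String Int) (h : ∀ t ∈ topics, t ∈ tc.keys) :
    (topics.foldl (fun tc t => if P t then tc.modify t 0 (· + 1) else tc) tc).keys = tc.keys := by
  induction topics generalizing tc with
  | nil => rfl
  | cons t ts ih =>
    simp only [List.foldl_cons]
    have hkeys : (if P t then tc.modify t 0 (· + 1) else tc).keys = tc.keys := by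
      by_cases hPt : P t
      · simp only [hPt, if_true]
        rw [PySem.Dict.keys_modify]
        exact PySem.Dict.keys_insert_of_contains _ _
          ((PySem.Dict.contains_iff_mem_keys _ _).mpr (h t List.mem_cons_self))
      · simp [hPt]
    rw [ih _ (fun t' ht' => hkeys ▸ h t' (List.mem_cons_of_mem _ ht')), hkeys]

theorem pv_outer_keys (words : List String) (topics : List String)
    (bag : String → List String) (tc : PySem.Dict String Int)
    (h : ∀ t ∈ topics, t ∈ tc.keys) :
    (words.foldl (fun tc word =>
        topics.foldl (fun tc topic =>
          if (bag topic).contains word then tc.modify topic 0 (· + 1) else tc) tc) tc).keys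
      = tc.keys := by
  induction words generalizing tc with
  | nil => rfl
  | cons w ws ih =>
    simp only [List.foldl_cons]
    have h1 := pv_inner_keys topics (fun t => (bag t).contains w) tc h
    rw [ih _ (fun t ht => h1 ▸ h t ht), h1]

-- B's scan returns a maximizer's topic, its count, and whether the maximum is tied
theorem pv_bfold (l : List (String × Int)) (hl : l ≠ []) :
    ∃ u ∈ l, (∀ q ∈ l, q.2 ≤ u.2) ∧
      l.foldl (fun s p => pvBStep s p.1 p.2) ("", none, false)
        = (u.1, some u.2, decide (1 < (l.map (fun p => p.2)).count u.2)) := by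
  induction l using List.reverseRecOn with
  | nil => exact absurd rfl hl
  | append_singleton l' p ih =>
    rcases eq_or_ne l' [] with rfl | hne
    · refine ⟨p, by simp, by simp, ?_⟩
      simp [pvBStep]
    · obtain ⟨u', hu'mem, hu'max, hfold⟩ := ih hne
      rw [List.foldl_append, hfold]
      simp only [List.foldl_cons, List.foldl_nil]
      rcases lt_trichotomy u'.2 p.2 with hlt | heq | hgt
      · refine ⟨p, by simp, ?_, ?_⟩
        · intro q hq
          rcases List.mem_append.mp hq with h | h
          · exact le_of_lt (lt_of_le_of_lt (hu'max q h) hlt)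
          · simp at h; simp [h]
        · have hcnt : (l'.map (fun p => p.2)).count p.2 = 0 := by
            rw [List.count_eq_zero]
            intro hmem
            obtain ⟨q, hq, hq2⟩ := List.mem_map.mp hmem
            exact absurd hq2 (ne_of_lt (lt_of_le_of_lt (hu'max q hq) hlt))
          simp [pvBStep, hlt, List.count_append, hcnt]
      · refine ⟨u', List.mem_append_left _ hu'mem, ?_, ?_⟩
        · intro q hq
          rcases List.mem_append.mp hq with h | h
          · exact hu'max q h
          · simp at h; rw [h, ← heq]
        · have heq' : p.2 = u'.2 := heq.symm
          simp [pvBStep, heq', List.count_append]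
          exact ⟨u'.1, by simpa using hu'mem⟩
      · refine ⟨u', List.mem_append_left _ hu'mem, ?_, ?_⟩
        · intro q hq
          rcases List.mem_append.mp hq with h | h
          · exact hu'max q h
          · simp at h; rw [h]; exact hgt.le
        · have hngt : ¬ (p.2 > u'.2) := by omega
          have hne2 : ¬ (p.2 = u'.2) := by omega
          have hcnt : ((l'.map (fun p => p.2)) ++ [p.2]).count u'.2
              = (l'.map (fun p => p.2)).count u'.2 := by
            simp [List.count_append, List.count_cons, List.count_nil]
            omega
          simp only [pvBStep, hngt, hne2, if_false, List.map_append,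
            List.map_cons, List.map_nil, hcnt]

-- A's sorted-rank uniqueness test equals B's unique-maximum scan on any counts list
theorem pv_select_eq (l : List (String × Int)) (hl : 2 ≤ l.length) :
    (let rank := PySem.List.sorted l (fun p => p.2) true
     let r0 := PySem.List.pyGetD rank 0 ("", 0)
     let r1 := PySem.List.pyGetD rank 1 ("", 0)
     if r0.2 ≠ r1.2 then r0.1 else "")
    = (let st := l.foldl (fun s p => pvBStep s p.1 p.2) ("", none, false)
       if st.2.2 then "" else st.1) := by
  have hne : l ≠ [] := by intro h; subst h; simp at hl
  obtain ⟨u, humem, humax, hfold⟩ := pv_bfold l hne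
  have hperm : (PySem.List.sorted l (fun p => p.2) true).Perm l :=
    PySem.List.sorted_perm l (fun p => p.2) true
  have hlen : (PySem.List.sorted l (fun p => p.2) true).length = l.length := hperm.length_eq
  cases hr : PySem.List.sorted l (fun p => p.2) true with
  | nil => rw [hr] at hlen; simp at hlen; omega
  | cons r0 t =>
    cases t with
    | nil => rw [hr] at hlen; simp at hlen; omega
    | cons r1 rest =>
      have hmax0 : ∀ y ∈ l, y.2 ≤ r0.2 := PySem.List.key_head_sorted_rev_ge l _ hr
      have hr0mem : r0 ∈ l := hperm.mem_iff.mp (by rw [hr]; simp)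
      have hr1mem : r1 ∈ l := hperm.mem_iff.mp (by rw [hr]; simp)
      have hM : r0.2 = u.2 := le_antisymm (humax r0 hr0mem) (hmax0 u humem)
      have hcntrank : ((PySem.List.sorted l (fun p => p.2) true).map (fun p => p.2)).count u.2
          = (l.map (fun p => p.2)).count u.2 := (hperm.map _).count_eq _
      rw [hr] at hcntrank
      simp only [List.map_cons, List.count_cons] at hcntrank
      have hcnt1 : 1 ≤ (l.map (fun p => p.2)).count u.2 :=
        List.one_le_count_iff.mpr (List.mem_map.mpr ⟨u, humem, rfl⟩)
      simp only [hfold]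
      simp only [PySem.List.pyGetD_zero_cons]
      have hget1 : PySem.List.pyGetD (r0::r1::rest) 1 ("",0) = r1 := by
        simp [PySem.List.pyGetD, PySem.List.pyGet?, PySem.List.pyIdx?]
      rw [hget1]
      by_cases hc : 1 < (l.map (fun p => p.2)).count u.2
      · -- the maximum is tied: both sides return ""
        have hr12 : r1.2 = u.2 := by
          by_contra hne12
          have hpw := PySem.List.sorted_pairwise_rev l (fun p => p.2)
          rw [hr] at hpw
          rw [List.pairwise_cons] at hpw
          rw [List.pairwise_cons] at hpw
          have hrest : ∃ q ∈ rest, q.2 = u.2 := by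
            simp [hM, hne12] at hcntrank
            have : 1 ≤ (rest.map (fun p => p.2)).count u.2 := by omega
            obtain ⟨v, hv, hv2⟩ := List.mem_map.mp (List.one_le_count_iff.mp this)
            exact ⟨v, hv, hv2⟩
          obtain ⟨q, hq, hq2⟩ := hrest
          have h1 : q.2 ≤ r1.2 := (hpw.2.1) q hq
          have h2 : r1.2 ≤ u.2 := humax r1 hr1mem
          exact hne12 (le_antisymm h2 (hq2 ▸ h1))
        have hcond : ¬ (r0.2 ≠ r1.2) := by rw [hM, hr12]; simp
        rw [if_neg hcond]
        simp [hc]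
      · -- the maximum is unique: both sides return its topic
        have hcnt : (l.map (fun p => p.2)).count u.2 = 1 := by omega
        have hr12 : r1.2 ≠ u.2 := by
          intro h12
          rw [hM, h12] at hcntrank
          simp at hcntrank
          omega
        have hfilter : (l.filter (fun p => p.2 == u.2)).length = 1 := by
          rw [← List.countP_eq_length_filter]
          rw [List.count, List.countP_map] at hcnt
          convert hcnt using 2
        obtain ⟨z, hz⟩ := List.length_eq_one_iff.mp hfilter
        have hu_f : u ∈ l.filter (fun p => p.2 == u.2) := List.mem_filter.mpr ⟨humem, by simp⟩
        have hr0_f : r0 ∈ l.filter (fun p => p.2 == u.2) := List.mem_filter.mpr ⟨hr0mem, by simp [hM]⟩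
        rw [hz] at hu_f hr0_f
        simp at hu_f hr0_f
        have hr0u : r0 = u := hr0_f.trans hu_f.symm
        have hcond : r0.2 ≠ r1.2 := by rw [hM]; exact fun h => hr12 h.symm
        rw [if_pos hcond]
        simp [hc, hr0u]

-- ===== VERDICT (by name: the statement is the Claim_ definition above) =====
theorem topic_detector_spec : Claim_equal_topic_detector := by
  intro user_input wordbag _ hpre
  unfold Pre_topic_detector at hpre
  unfold Spec_topic_detector
  unfold topic_detector topic_detector_alt
  dsimp only
  set d := PySem.Dict.ofList wordbag with hd
  have hnd : d.keys.Nodup := PySem.Dict.nodup_keys_ofList wordbag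
  have hklen : 2 ≤ d.keys.length := by
    rw [hd, pv_keys_ofList]; exact hpre
  set words := PySem.Str.split₀ (removePunctuation (PySem.Str.lower user_input)) with hw
  set cnt : String → Int := fun t => (words.countP (fun w => (d.getD t []).contains w) : Int)
    with hcnt
  set L : List (String × Int) := d.keys.map (fun t => (t, cnt t)) with hL
  -- A's counter has items L
  have htc0keys : (d.keys.foldl (fun tc t => tc.insert t 0)
      (PySem.Dict.empty : PySem.Dict String Int)).keys = d.keys := by
    rw [PySem.Dict.keys_foldl_insert d.keys (fun _ _ => (0 : Int)) PySem.Dict.empty]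
    rw [PySem.Dict.keys_empty, PySem.Set.update_nil_left]
    exact PySem.Set.ofList_eq_self_of_nodup _ hnd
  have htc0items : (d.keys.foldl (fun tc t => tc.insert t 0)
      (PySem.Dict.empty : PySem.Dict String Int)).items = d.keys.map (fun t => (t, (0 : Int))) := by
    have := PySem.Dict.items_foldl_insert_fresh d.keys (fun t => t) (fun _ => (0 : Int))
      (PySem.Dict.empty : PySem.Dict String Int) (by simp [PySem.Dict.contains_empty])
      (by simpa using hnd)
    simpa using this
  set tc0 := d.keys.foldl (fun tc t => tc.insert t 0)
      (PySem.Dict.empty : PySem.Dict String Int) with htc0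
  set tcF := words.foldl (fun tc word =>
      d.keys.foldl (fun tc topic =>
        if (d.getD topic []).contains word then tc.modify topic 0 (· + 1) else tc) tc) tc0
    with htcF
  have hkeysF : tcF.keys = d.keys := by
    rw [htcF, pv_outer_keys words d.keys (fun t => d.getD t []) tc0 (by rw [htc0keys]; exact fun t ht => ht)]
    exact htc0keys
  have hitems : tcF.items = L := by
    rw [PySem.Dict.items_eq_map_keys tcF (by rw [hkeysF]; exact hnd) 0, hkeysF, hL]
    apply List.map_congr_left
    intro t ht
    have hget0 : tc0.getD t 0 = 0 :=
      PySem.Dict.getD_of_mem_items tc0 (by rw [htc0items]; exact List.mem_map.mpr ⟨t, ht, rfl⟩)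
        (by rw [htc0keys]; exact hnd) 0
    rw [htcF, pv_outer_getD words d.keys hnd (fun t => d.getD t []) tc0 t, hget0, if_pos ht]
    rw [hcnt]
    simp only [zero_add]
  -- B's fold over d.items is the pvBStep fold over L
  have hBitems : d.items = d.keys.map (fun t => (t, d.getD t [])) :=
    PySem.Dict.items_eq_map_keys d hnd []
  have hBfold : d.items.foldl (fun s p =>
        pvBStep s p.1 ((words.countP (fun w => (PySem.Set.ofList p.2).contains w) : Int)))
      ("", none, false)
      = L.foldl (fun s p => pvBStep s p.1 p.2) ("", none, false) := by
    rw [hBitems, hL, List.foldl_map, List.foldl_map]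
    have hset : ∀ (bag : List String) (w : String),
        (PySem.Set.ofList bag).contains w = bag.contains w := by
      intro bag w
      simp [PySem.Set.contains_eq_listContains]
    have hstep : (fun (s : String × Option Int × Bool) t =>
          pvBStep s t ((words.countP (fun w => (PySem.Set.ofList (d.getD t [])).contains w) : Int)))
        = fun s t => pvBStep s t (cnt t) := by
      funext s t
      rw [hcnt]
      simp only [hset]
    rw [hstep]
  have hLlen : 2 ≤ L.length := by rw [hL]; simpa using hklen
  rw [hitems, hBfold]
  exact pv_select_eq L hLlen
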